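-- pv_equiv track=rewrite | github.com/Gi-PerSS/School-21-StudyProjects | projects/s21_Phython_bootcamp/Part_01/src/exercise03/task3.py | FindAFigures
-- ===== SOURCE A (Python) =====
-- def CheckIfSquare(field_matrix:list[list[int]], figure_coords:list[tuple[int, int]])->bool:
--     """ Проверяем на квадратность. По условию задания, если фигура не правильный квадрат, то она круг, поэтому просто проверяем левый верхний угол."""
--     y, x = figure_coords[0]
--     rows, cols = GetMatrixDimension(field_matrix)
--     # Если первая точка фигуры на краю поля, это квадрат
--     # Если точка вниз по диагонали на 1 позицию от первой не относится к фигуре, то фигура имеет угол, значит квадрат.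
--     if (x == 0 or y == rows-1 or field_matrix[y+1][x-1]==0):
--         return True
--     else:
--         return False
--
-- def GetMatrixDimension(field_matrix: list[list[int]])->tuple[int, int]:
--     return (len(field_matrix), len(field_matrix[0]))
--
-- def ExtractFigureCoords(field_matrix, visited_matrix, y,x, figure_coords):
--     """ Находим координаты облака точек фигуры, через проверку на смежность. Метод связных компонент."""
--     rows, cols = GetMatrixDimension(field_matrix)
--
--     # проверка на предмет выхода за пределы поля матрицы в процессе рекурсии
--     if (y<0 or y>= rows or x<0 or x>= cols):
--         return
--
--     # если вне фигуры или клетка посещена, то скип.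
--     if (field_matrix[y][x]==0 or visited_matrix[y][x]):
--         return
--
--     # добавляем координаты точки в текущую фигуру
--     figure_coords.append((y,x))
--     visited_matrix[y][x]=True
--
--     # проверяем окружение точки через рекурсивный вызов
--     for i in range(y-1, y+1+1): # правое число range не входит в диапазон
--         for j in range(x-1, x+2):
--             ExtractFigureCoords(field_matrix, visited_matrix, i, j, figure_coords)
--
-- def FindAFigures(field_matrix: list[list[int]]):
--     """ Проходим матрицу, извлекая фигуры"""
--     squares = 0
--     circles = 0
--     rows, cols = GetMatrixDimension(field_matrix)
--     actual_figure = []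
--
--     # Генерируем пустую матрицу посещений
--     visited = [[False for element in line] for line in field_matrix]
--
--     for i in range(rows):
--         for j in range(cols):
--             if(field_matrix[i][j] == 1 and not visited[i][j]):
--                 actual_figure = []
--                 ExtractFigureCoords(field_matrix, visited, i, j, actual_figure)
--                 if(CheckIfSquare(field_matrix, actual_figure)):
--                     squares+=1
--                 else:
--                     circles+=1
--     return (squares, circles)
-- ===== SOURCE B (Python) =====
-- def FindAFigures(field_matrix):
--     """Single-pass scan: flood-fill with an explicit stack marking visited only;
--     classify each figure directly from its seed cell (the first cell A would record),
--     so no coordinate list is ever built."""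
--     rows, cols = len(field_matrix), len(field_matrix[0])
--     visited = [[False for element in line] for line in field_matrix]
--     squares = 0
--     circles = 0
--     for i in range(rows):
--         for j in range(cols):
--             if field_matrix[i][j] == 1 and not visited[i][j]:
--                 stack = [(i, j)]
--                 while stack:
--                     y, x = stack.pop()
--                     if 0 <= y < rows and 0 <= x < cols \
--                             and field_matrix[y][x] != 0 and not visited[y][x]:
--                         visited[y][x] = True
--                         for dy in (1, 0, -1):
--                             for dx in (1, 0, -1):
--                                 stack.append((y + dy, x + dx))
--                 # seed (i, j) is the top-left-most cell of the figure in scan order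
--                 if j == 0 or i == rows - 1 or field_matrix[i + 1][j - 1] == 0:
--                     squares += 1
--                 else:
--                     circles += 1
--     return (squares, circles)
-- ===== Notes on version B (the rewrite author's own statement) =====
-- stated objective: alternative
-- what changed: B never builds the figure_coords list or a recursion: it flood-fills with an explicit stack that only marks visited cells, and classifies each figure directly from its scan-order seed cell (which is always the first coordinate A's recursion records), dropping CheckIfSquare and ExtractFigureCoords entirely.
import Mathlib
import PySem

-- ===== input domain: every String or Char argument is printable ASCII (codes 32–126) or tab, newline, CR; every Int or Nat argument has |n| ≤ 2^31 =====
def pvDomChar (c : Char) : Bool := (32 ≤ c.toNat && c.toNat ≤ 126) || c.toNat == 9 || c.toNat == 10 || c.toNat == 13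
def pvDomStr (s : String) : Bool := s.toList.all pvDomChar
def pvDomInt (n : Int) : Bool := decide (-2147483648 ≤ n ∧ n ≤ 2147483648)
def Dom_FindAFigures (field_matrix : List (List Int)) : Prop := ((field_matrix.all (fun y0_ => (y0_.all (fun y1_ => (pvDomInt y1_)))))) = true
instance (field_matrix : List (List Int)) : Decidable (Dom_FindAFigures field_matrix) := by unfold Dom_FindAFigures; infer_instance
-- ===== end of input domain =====

-- B drops A's recursion AND the figure_coords list: it flood-fills with an explicit stack that
-- only marks visited cells and classifies each figure directly from its scan-order seed cell
-- (always the first coordinate A's recursion records). Same return value; the Pythons mutate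
-- their local visited lists in place, the equivalence proved is about the return value.

-- shared low-level indexing helpers (both Pythons index the same way)

-- field_matrix[y][x] totalized with default 0: inside both algorithms every read is guarded in range
def pvGetI (m : List (List Int)) (y x : Int) : Int :=
  ((PySem.List.pyGet? m y).bind (fun r => PySem.List.pyGet? r x)).getD 0

-- visited[y][x] totalized with default true (reads are in range under Pre_)
def pvGetB (m : List (List Bool)) (y x : Int) : Bool :=
  ((PySem.List.pyGet? m y).bind (fun r => PySem.List.pyGet? r x)).getD true

-- visited[y][x] = True (y, x are guarded nonnegative and in range at every call site)
def pvMark (m : List (List Bool)) (y x : Int) : List (List Bool) :=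
  m.modify y.toNat (fun row => row.set x.toNat true)

-- ===== PORT A =====
-- CheckIfSquare; [] is unreachable from the driver (Python would raise IndexError there)
def pvCheckSquare (field : List (List Int)) (coords : List (Int × Int)) : Bool :=
  match coords with
  | [] => true
  | (y, x) :: _ =>
    let rows : Int := field.length
    if x == 0 || y == rows - 1 || pvGetI field (y + 1) (x - 1) == 0 then true else false

-- ExtractFigureCoords of A: recursion over the 3×3 neighbourhood ranges; state = (visited, figure_coords).
-- fuel is a totality guard only: the top-level call passes total cells + 1, which the recursion
-- (marking one fresh cell per level) never exhausts.
def pvExtractA (field : List (List Int)) (rows cols : Int) :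
    Nat → (List (List Bool) × List (Int × Int)) → Int → Int → List (List Bool) × List (Int × Int)
  | 0, st, _, _ => st
  | f + 1, st, y, x =>
    if y < 0 ∨ rows ≤ y ∨ x < 0 ∨ cols ≤ x then st
    else if pvGetI field y x == 0 || pvGetB st.1 y x then st
    else
      let st1 := (pvMark st.1 y x, st.2 ++ [(y, x)])
      (PySem.List.pyRange (y - 1) (y + 1 + 1) 1).foldl
        (fun s i =>
          (PySem.List.pyRange (x - 1) (x + 2) 1).foldl
            (fun s2 j => pvExtractA field rows cols f s2 i j) s) st1

def FindAFigures (field_matrix : List (List Int)) : Int × Int :=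
  let rows : Int := field_matrix.length
  let cols : Int := (field_matrix.headI).length   -- len(field_matrix[0]); [] is excluded by Pre_
  let visited0 := field_matrix.map (fun line => line.map (fun _ => false))
  let fuel := (field_matrix.map List.length).sum + 1
  let fin := (PySem.List.pyRange 0 rows 1).foldl
    (fun s i =>
      (PySem.List.pyRange 0 cols 1).foldl
        (fun s j =>
          if pvGetI field_matrix i j == 1 && !(pvGetB s.2.2 i j) then
            let res := pvExtractA field_matrix rows cols fuel (s.2.2, []) i j
            if pvCheckSquare field_matrix res.2 then (s.1 + 1, s.2.1, res.1)
            else (s.1, s.2.1 + 1, res.1)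
          else s) s)
    ((0 : Int), (0 : Int), visited0)
  (fin.1, fin.2.1)

-- ===== PORT B =====
-- B's flood fill: explicit stack (top of stack = list head; Python pops from the list's end),
-- state is the visited matrix only — no coordinate list exists in B.
-- fuel guards totality only: the driver passes 9 · total cells + 1, one unit per pop.
def pvFloodB (field : List (List Int)) (rows cols : Int) :
    Nat → List (List Bool) → List (Int × Int) → List (List Bool)
  | _, vis, [] => vis
  | 0, vis, _ :: _ => vis
  | f + 1, vis, (y, x) :: rest =>
    if 0 ≤ y ∧ y < rows ∧ 0 ≤ x ∧ x < cols ∧ pvGetI field y x ≠ 0 ∧ pvGetB vis y x = false then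
      pvFloodB field rows cols f (pvMark vis y x)
        (([(1 : Int), 0, -1]).foldl
          (fun s dy => ([(1 : Int), 0, -1]).foldl (fun s2 dx => (y + dy, x + dx) :: s2) s) rest)
    else
      pvFloodB field rows cols f vis rest

def FindAFigures_alt (field_matrix : List (List Int)) : Int × Int :=
  let rows : Int := field_matrix.length
  let cols : Int := (field_matrix.headI).length
  let visited0 := field_matrix.map (fun line => line.map (fun _ => false))
  let fuel := 9 * (field_matrix.map List.length).sum + 1
  let fin := (PySem.List.pyRange 0 rows 1).foldl
    (fun s i =>
      (PySem.List.pyRange 0 cols 1).foldl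
        (fun s j =>
          if pvGetI field_matrix i j == 1 && !(pvGetB s.2.2 i j) then
            let vis' := pvFloodB field_matrix rows cols fuel s.2.2 [(i, j)]
            -- classify from the seed (i, j) directly
            if j == 0 || i == rows - 1 || pvGetI field_matrix (i + 1) (j - 1) == 0 then
              (s.1 + 1, s.2.1, vis')
            else (s.1, s.2.1 + 1, vis')
          else s) s)
    ((0 : Int), (0 : Int), visited0)
  (fin.1, fin.2.1)

-- ===== PRECONDITION & SPEC =====
-- Pre_ excludes exactly the inputs where the Python A raises IndexError: the empty matrix
-- (len(field_matrix[0])) and matrices with a row shorter than row 0 (the outer scan reads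
-- field_matrix[i][j] for every j < len(row 0)); B raises identically there.
def Pre_FindAFigures (field_matrix : List (List Int)) : Prop :=
  field_matrix ≠ [] ∧ ∀ r ∈ field_matrix, (field_matrix.headI).length ≤ r.length
instance (field_matrix : List (List Int)) : Decidable (Pre_FindAFigures field_matrix) := by
  unfold Pre_FindAFigures; infer_instance

def pvWitness_FindAFigures : List (List Int) := [[1, 1, 0], [1, 1, 0], [0, 0, 1]]

def Spec_FindAFigures (field_matrix : List (List Int)) (out : Int × Int) : Prop := out = FindAFigures_alt field_matrix
instance (field_matrix : List (List Int)) (out : Int × Int) : Decidable (Spec_FindAFigures field_matrix out) := by unfold Spec_FindAFigures; infer_instance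

-- ===== CLAIM (what is proved, stated in full; the proofs are below) =====
def Claim_equal_FindAFigures : Prop := ∀ (field_matrix : List (List Int)), Dom_FindAFigures field_matrix → Pre_FindAFigures field_matrix → Spec_FindAFigures field_matrix (FindAFigures field_matrix)

-- ===== LEMMAS AND PROOFS =====

def pvUnv (m : List (List Bool)) : Nat := (m.map (fun r => r.count false)).sum
def pvNbrs (y x : Int) : List (Int × Int) :=
  [(y-1, x-1), (y-1, x), (y-1, x+1), (y, x-1), (y, x), (y, x+1), (y+1, x-1), (y+1, x), (y+1, x+1)]
lemma pvRange3_up (t : Int) : PySem.List.pyRange (t - 1) (t + 1 + 1) 1 = [t - 1, t, t + 1] := by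
  rw [PySem.List.pyRange_one_cons (by omega), PySem.List.pyRange_one_cons (by omega),
      PySem.List.pyRange_one_cons (by omega), PySem.List.pyRange_one_eq_nil (by omega)]
  norm_num

lemma pvExtractA_mark (field : List (List Int)) (rows cols : Int) (f : Nat) (st) (y x : Int)
    (hg : ¬(y < 0 ∨ rows ≤ y ∨ x < 0 ∨ cols ≤ x))
    (hv : ¬(pvGetI field y x == 0 || pvGetB st.1 y x) = true) :
    pvExtractA field rows cols (f + 1) st y x =
      (pvNbrs y x).foldl (fun s c => pvExtractA field rows cols f s c.1 c.2)
        (pvMark st.1 y x, st.2 ++ [(y, x)]) := by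
  simp only [pvExtractA, if_neg hg, if_neg hv, pvRange3_up y]
  simp [pvNbrs, show x + 2 = x + 1 + 1 by ring, pvRange3_up x]

lemma pvFloodB_mark (field : List (List Int)) (rows cols : Int) (f : Nat) (vis) (y x : Int) (rest)
    (h : 0 ≤ y ∧ y < rows ∧ 0 ≤ x ∧ x < cols ∧ pvGetI field y x ≠ 0 ∧ pvGetB vis y x = false) :
    pvFloodB field rows cols (f + 1) vis ((y, x) :: rest) =
      pvFloodB field rows cols f (pvMark vis y x) (pvNbrs y x ++ rest) := by
  simp only [pvFloodB, if_pos h]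
  simp [pvNbrs, sub_eq_add_neg]

lemma pvFloodB_skip (field : List (List Int)) (rows cols : Int) (f : Nat) (vis) (y x : Int) (rest)
    (h : ¬(0 ≤ y ∧ y < rows ∧ 0 ≤ x ∧ x < cols ∧ pvGetI field y x ≠ 0 ∧ pvGetB vis y x = false)) :
    pvFloodB field rows cols (f + 1) vis ((y, x) :: rest) = pvFloodB field rows cols f vis rest := by
  simp only [pvFloodB, if_neg h]

lemma pvSet_count_lt (row : List Bool) : ∀ (j : Nat), row[j]? = some false →
    (row.set j true).count false < row.count false := by
  induction row with
  | nil => intro j h; simp at h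
  | cons b bs ih =>
    intro j h
    cases j with
    | zero => simp at h; subst h; simp
    | succ j =>
      simp at h
      have := ih j h
      cases b <;> simp [List.set] <;> omega

lemma pvUnv_mark_lt (m : List (List Bool)) (y x : Int) (hy : 0 ≤ y) (hx : 0 ≤ x)
    (h : pvGetB m y x = false) : pvUnv (pvMark m y x) < pvUnv m := by
  unfold pvGetB at h
  rw [PySem.List.pyGet?_of_nonneg _ hy] at h
  cases hrow : m[y.toNat]? with
  | none => rw [hrow] at h; simp at h
  | some row =>
    rw [hrow] at h
    simp only [Option.bind_some] at h
    rw [PySem.List.pyGet?_of_nonneg _ hx] at h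
    cases hc : row[x.toNat]? with
    | none => rw [hc] at h; simp at h
    | some b => rw [hc] at h; simp at h; subst h
                clear hy hx
                unfold pvMark pvUnv
                induction m generalizing y with
                | nil => simp at hrow
                | cons r rs ih =>
                  by_cases h0 : y.toNat = 0
                  · rw [h0] at hrow ⊢
                    simp at hrow; subst hrow
                    rw [List.modify_zero_cons]
                    simp
                    have := pvSet_count_lt r x.toNat hc
                    omega
                  · obtain ⟨k, hk⟩ : ∃ k, y.toNat = k + 1 := ⟨y.toNat - 1, by omega⟩
                    rw [hk] at hrow ⊢
                    simp at hrow
                    have := ih (y := (k : Int)) (by simpa using hrow)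
                    simp at this
                    rw [List.modify_succ_cons]
                    simp
                    omega

lemma pvShape_mark (m : List (List Bool)) (y x : Int) :
    (pvMark m y x).map List.length = m.map List.length := by
  unfold pvMark
  induction m generalizing y with
  | nil => simp
  | cons r rs ih =>
    cases h : y.toNat with
    | zero => rw [List.modify_zero_cons]; simp
    | succ k =>
      rw [List.modify_succ_cons]
      have := ih (y := (k : Int))
      simp at this
      simp [this]

lemma pvFoldl_unv_le (g : (List (List Bool) × List (Int × Int)) → Int × Int → (List (List Bool) × List (Int × Int)))
    (h : ∀ s c, pvUnv (g s c).1 ≤ pvUnv s.1) :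
    ∀ (l : List (Int × Int)) s, pvUnv ((l.foldl g s)).1 ≤ pvUnv s.1 := by
  intro l
  induction l with
  | nil => intro s; simp
  | cons c cs ih => intro s; exact le_trans (ih (g s c)) (h s c)

lemma pvFoldl_shape (g : (List (List Bool) × List (Int × Int)) → Int × Int → (List (List Bool) × List (Int × Int)))
    (h : ∀ s c, (g s c).1.map List.length = s.1.map List.length) :
    ∀ (l : List (Int × Int)) s, ((l.foldl g s)).1.map List.length = s.1.map List.length := by
  intro l
  induction l with
  | nil => intro s; simp
  | cons c cs ih => intro s; rw [List.foldl_cons, ih (g s c), h s c]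

lemma pvFoldl_snd_ext (g : (List (List Bool) × List (Int × Int)) → Int × Int → (List (List Bool) × List (Int × Int)))
    (h : ∀ s c, ∃ t, (g s c).2 = s.2 ++ t) :
    ∀ (l : List (Int × Int)) s, ∃ t, ((l.foldl g s)).2 = s.2 ++ t := by
  intro l
  induction l with
  | nil => intro s; exact ⟨[], by simp⟩
  | cons c cs ih =>
    intro s
    obtain ⟨t1, h1⟩ := h s c
    obtain ⟨t2, h2⟩ := ih (g s c)
    exact ⟨t1 ++ t2, by rw [List.foldl_cons, h2, h1, List.append_assoc]⟩

lemma pvSet_count_le (row : List Bool) : ∀ (j : Nat),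
    (row.set j true).count false ≤ row.count false := by
  induction row with
  | nil => intro j; simp
  | cons b bs ih =>
    intro j
    cases j with
    | zero => cases b <;> simp
    | succ j => have := ih j; cases b <;> simp [List.set] <;> omega

lemma pvUnv_mark_le (m : List (List Bool)) (y x : Int) : pvUnv (pvMark m y x) ≤ pvUnv m := by
  unfold pvMark pvUnv
  induction m generalizing y with
  | nil => simp
  | cons r rs ih =>
    cases h : y.toNat with
    | zero =>
      rw [List.modify_zero_cons]
      have := pvSet_count_le r x.toNat
      simp; omega
    | succ k =>
      rw [List.modify_succ_cons]
      have := ih (y := (k : Int))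
      simp at this
      simp; omega

lemma pvExtractA_unv_le (field : List (List Int)) (rows cols : Int) :
    ∀ (f : Nat) st (y x : Int), pvUnv (pvExtractA field rows cols f st y x).1 ≤ pvUnv st.1 := by
  intro f
  induction f with
  | zero => intro st y x; simp [pvExtractA]
  | succ f ih =>
    intro st y x
    by_cases hg : y < 0 ∨ rows ≤ y ∨ x < 0 ∨ cols ≤ x
    · simp [pvExtractA, if_pos hg]
    · by_cases hv : (pvGetI field y x == 0 || pvGetB st.1 y x) = true
      · rw [show pvExtractA field rows cols (f+1) st y x = st from by
          simp only [pvExtractA]; rw [if_neg hg, if_pos hv]]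
      · rw [pvExtractA_mark field rows cols f st y x hg hv]
        exact le_trans (pvFoldl_unv_le _ (fun s c => ih s c.1 c.2) _ _) (pvUnv_mark_le st.1 y x)

lemma pvExtractA_shape (field : List (List Int)) (rows cols : Int) :
    ∀ (f : Nat) st (y x : Int),
      (pvExtractA field rows cols f st y x).1.map List.length = st.1.map List.length := by
  intro f
  induction f with
  | zero => intro st y x; simp [pvExtractA]
  | succ f ih =>
    intro st y x
    by_cases hg : y < 0 ∨ rows ≤ y ∨ x < 0 ∨ cols ≤ x
    · simp [pvExtractA, if_pos hg]
    · by_cases hv : (pvGetI field y x == 0 || pvGetB st.1 y x) = true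
      · rw [show pvExtractA field rows cols (f+1) st y x = st from by
          simp only [pvExtractA]; rw [if_neg hg, if_pos hv]]
      · rw [pvExtractA_mark field rows cols f st y x hg hv]
        rw [pvFoldl_shape _ (fun s c => ih s c.1 c.2) _ _]
        exact pvShape_mark st.1 y x

lemma pvExtractA_snd_ext (field : List (List Int)) (rows cols : Int) :
    ∀ (f : Nat) st (y x : Int), ∃ t, (pvExtractA field rows cols f st y x).2 = st.2 ++ t := by
  intro f
  induction f with
  | zero => intro st y x; exact ⟨[], by simp [pvExtractA]⟩
  | succ f ih =>
    intro st y x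
    by_cases hg : y < 0 ∨ rows ≤ y ∨ x < 0 ∨ cols ≤ x
    · exact ⟨[], by simp [pvExtractA, if_pos hg]⟩
    · by_cases hv : (pvGetI field y x == 0 || pvGetB st.1 y x) = true
      · exact ⟨[], by rw [show pvExtractA field rows cols (f+1) st y x = st from by
          simp only [pvExtractA]; rw [if_neg hg, if_pos hv]]; simp⟩
      · rw [pvExtractA_mark field rows cols f st y x hg hv]
        obtain ⟨t, ht⟩ := pvFoldl_snd_ext _ (fun s c => ih s c.1 c.2) (pvNbrs y x)
          (pvMark st.1 y x, st.2 ++ [(y, x)])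
        exact ⟨(y, x) :: t, by rw [ht]; simp⟩

-- the seed is the first coordinate A's recursion records
lemma pvExtractA_head (field : List (List Int)) (rows cols : Int) (f : Nat) (vis) (y x : Int)
    (hg : ¬(y < 0 ∨ rows ≤ y ∨ x < 0 ∨ cols ≤ x))
    (hv : ¬(pvGetI field y x == 0 || pvGetB vis y x) = true) :
    ∃ t, (pvExtractA field rows cols (f + 1) (vis, []) y x).2 = (y, x) :: t := by
  rw [pvExtractA_mark field rows cols f (vis, []) y x hg hv]
  obtain ⟨t, ht⟩ := pvFoldl_snd_ext _
    (fun s c => pvExtractA_snd_ext field rows cols f s c.1 c.2) (pvNbrs y x)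
    (pvMark vis y x, ([] : List (Int × Int)) ++ [(y, x)])
  exact ⟨t, by rw [ht]; simp⟩

-- A's recursion projected to its visited matrix = B's stack loop
lemma pvBridge (field : List (List Int)) (rows cols : Int) :
    ∀ (fB : Nat) (fA : Nat) (st : List (List Bool) × List (Int × Int)) (stack : List (Int × Int)),
      pvUnv st.1 < fA → 9 * pvUnv st.1 + stack.length ≤ fB →
      (stack.foldl (fun s c => pvExtractA field rows cols fA s c.1 c.2) st).1 =
        pvFloodB field rows cols fB st.1 stack := by
  intro fB
  induction fB using Nat.strong_induction_on with
  | _ fB IH =>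
    intro fA st stack hA hB
    match stack with
    | [] => cases fB <;> simp [pvFloodB]
    | (y, x) :: rest =>
      match fB, fA with
      | fB' + 1, fA' + 1 =>
        rw [List.foldl_cons]
        by_cases hg : y < 0 ∨ rows ≤ y ∨ x < 0 ∨ cols ≤ x
        · have e1 : pvExtractA field rows cols (fA' + 1) st y x = st := by
            simp only [pvExtractA]; rw [if_pos hg]
          have e2 : pvFloodB field rows cols (fB' + 1) st.1 ((y, x) :: rest) =
              pvFloodB field rows cols fB' st.1 rest :=
            pvFloodB_skip field rows cols fB' st.1 y x rest (by
              intro ⟨h1, h2, h3, h4, _⟩; omega)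
          rw [e1, e2]
          exact IH fB' (by omega) (fA' + 1) st rest hA (by simp only [List.length_cons] at hB; omega)
        · by_cases hv : (pvGetI field y x == 0 || pvGetB st.1 y x) = true
          · have e1 : pvExtractA field rows cols (fA' + 1) st y x = st := by
              simp only [pvExtractA]; rw [if_neg hg, if_pos hv]
            have e2 : pvFloodB field rows cols (fB' + 1) st.1 ((y, x) :: rest) =
                pvFloodB field rows cols fB' st.1 rest :=
              pvFloodB_skip field rows cols fB' st.1 y x rest (by
                intro ⟨_, _, _, _, h5, h6⟩
                simp only [Bool.or_eq_true, beq_iff_eq] at hv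
                rcases hv with hv | hv
                · exact h5 hv
                · rw [h6] at hv; exact Bool.false_ne_true hv)
            rw [e1, e2]
            exact IH fB' (by omega) (fA' + 1) st rest hA (by simp only [List.length_cons] at hB; omega)
          · -- mark case
            have hy : 0 ≤ y := by omega
            have hx : 0 ≤ x := by omega
            have hvb : pvGetB st.1 y x = false := by
              simp only [Bool.or_eq_true, beq_iff_eq] at hv
              push Not at hv
              exact Bool.not_eq_true _ ▸ hv.2
            have hvi : pvGetI field y x ≠ 0 := by
              simp only [Bool.or_eq_true, beq_iff_eq] at hv
              push Not at hv
              exact hv.1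
            set st1 : List (List Bool) × List (Int × Int) := (pvMark st.1 y x, st.2 ++ [(y, x)]) with hst1
            have hU1 : pvUnv st1.1 < pvUnv st.1 := pvUnv_mark_lt st.1 y x hy hx hvb
            set st2 := (pvNbrs y x).foldl (fun s c => pvExtractA field rows cols fA' s c.1 c.2) st1 with hst2
            have hU2 : pvUnv st2.1 ≤ pvUnv st1.1 :=
              pvFoldl_unv_le _ (fun s c => pvExtractA_unv_le field rows cols fA' s c.1 c.2) _ _
            have eA : pvExtractA field rows cols (fA' + 1) st y x = st2 :=
              pvExtractA_mark field rows cols fA' st y x hg hv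
            have eB : pvFloodB field rows cols (fB' + 1) st.1 ((y, x) :: rest) =
                pvFloodB field rows cols fB' (pvMark st.1 y x) (pvNbrs y x ++ rest) :=
              pvFloodB_mark field rows cols fB' st.1 y x rest
                ⟨hy, by omega, hx, by omega, hvi, hvb⟩
            have hB' : 9 * pvUnv st.1 + rest.length + 1 ≤ fB' + 1 := by
              simp only [List.length_cons] at hB; omega
            have r1 : pvFloodB field rows cols fB' st1.1 (pvNbrs y x ++ rest) =
                ((pvNbrs y x ++ rest).foldl (fun s c => pvExtractA field rows cols fA' s c.1 c.2) st1).1 :=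
              (IH fB' (by omega) fA' st1 (pvNbrs y x ++ rest)
                (by omega) (by simp [pvNbrs]; omega)).symm
            have r2 : ((pvNbrs y x ++ rest).foldl (fun s c => pvExtractA field rows cols fA' s c.1 c.2) st1).1 =
                (rest.foldl (fun s c => pvExtractA field rows cols fA' s c.1 c.2) st2).1 := by
              rw [List.foldl_append]
            have l1 : (rest.foldl (fun s c => pvExtractA field rows cols (fA' + 1) s c.1 c.2) st2).1 =
                pvFloodB field rows cols (9 * pvUnv st2.1 + rest.length) st2.1 rest :=
              IH _ (by omega) (fA' + 1) st2 rest (by omega) le_rfl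
            have l2 : (rest.foldl (fun s c => pvExtractA field rows cols fA' s c.1 c.2) st2).1 =
                pvFloodB field rows cols (9 * pvUnv st2.1 + rest.length) st2.1 rest :=
              IH _ (by omega) fA' st2 rest (by omega) le_rfl
            rw [eA, eB, show pvMark st.1 y x = st1.1 from rfl, r1, r2, l1, l2]

lemma pvUnv_le_total (field : List (List Int)) (vis : List (List Bool))
    (h : vis.map List.length = field.map List.length) :
    pvUnv vis ≤ (field.map List.length).sum := by
  rw [← h]
  clear h
  unfold pvUnv
  induction vis with
  | nil => simp
  | cons r rs ih =>
    simp only [List.map_cons, List.sum_cons]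
    exact Nat.add_le_add (List.count_le_length) ih

-- one outer-scan cell: A's recursive extraction's visited matrix = B's flood from the singleton stack
lemma pvCellEq (field : List (List Int)) (rows cols : Int) (vis : List (List Bool))
    (h : vis.map List.length = field.map List.length) (i j : Int) :
    (pvExtractA field rows cols ((field.map List.length).sum + 1) (vis, []) i j).1 =
      pvFloodB field rows cols (9 * (field.map List.length).sum + 1) vis [(i, j)] := by
  have hu : pvUnv vis ≤ (field.map List.length).sum := pvUnv_le_total field vis h
  have hb := pvBridge field rows cols (9 * (field.map List.length).sum + 1)
      ((field.map List.length).sum + 1) (vis, []) [(i, j)] (by simpa using by omega)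
      (by simp; omega)
  rw [show pvExtractA field rows cols ((field.map List.length).sum + 1) (vis, []) i j =
      List.foldl (fun s c => pvExtractA field rows cols ((field.map List.length).sum + 1) s c.1 c.2)
        (vis, []) [(i, j)] from by simp]
  exact hb

lemma pvInnerCong (field : List (List Int)) (rows cols : Int) (hr : rows = (field.length : Int))
    (i : Int) (hi : 0 ≤ i ∧ i < rows) :
    ∀ (l : List Int), (∀ j ∈ l, 0 ≤ j ∧ j < cols) → ∀ (s : Int × Int × List (List Bool)),
      s.2.2.map List.length = field.map List.length →
      l.foldl (fun s j =>
          if pvGetI field i j == 1 && !(pvGetB s.2.2 i j) then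
            let res := pvExtractA field rows cols ((field.map List.length).sum + 1) (s.2.2, []) i j
            if pvCheckSquare field res.2 then (s.1 + 1, s.2.1, res.1)
            else (s.1, s.2.1 + 1, res.1)
          else s) s =
        l.foldl (fun s j =>
          if pvGetI field i j == 1 && !(pvGetB s.2.2 i j) then
            let vis' := pvFloodB field rows cols (9 * (field.map List.length).sum + 1) s.2.2 [(i, j)]
            if j == 0 || i == rows - 1 || pvGetI field (i + 1) (j - 1) == 0 then
              (s.1 + 1, s.2.1, vis')
            else (s.1, s.2.1 + 1, vis')
          else s) s ∧
      (l.foldl (fun s j =>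
          if pvGetI field i j == 1 && !(pvGetB s.2.2 i j) then
            let res := pvExtractA field rows cols ((field.map List.length).sum + 1) (s.2.2, []) i j
            if pvCheckSquare field res.2 then (s.1 + 1, s.2.1, res.1)
            else (s.1, s.2.1 + 1, res.1)
          else s) s).2.2.map List.length = field.map List.length := by
  intro l
  induction l with
  | nil => intro _ s hs; exact ⟨rfl, hs⟩
  | cons j js ih =>
    intro hmem s hs
    have hj : 0 ≤ j ∧ j < cols := hmem j (List.mem_cons_self ..)
    have hmem' : ∀ j' ∈ js, 0 ≤ j' ∧ j' < cols := fun j' h' => hmem j' (List.mem_cons_of_mem _ h')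
    rw [List.foldl_cons, List.foldl_cons]
    by_cases hc : (pvGetI field i j == 1 && !(pvGetB s.2.2 i j)) = true
    · have hc1 : pvGetI field i j = 1 := by
        simp only [Bool.and_eq_true, beq_iff_eq] at hc; exact hc.1
      have hc2 : pvGetB s.2.2 i j = false := by
        simp only [Bool.and_eq_true, Bool.not_eq_true'] at hc; exact hc.2
      have hg : ¬(i < 0 ∨ rows ≤ i ∨ j < 0 ∨ cols ≤ j) := by omega
      have hv : ¬(pvGetI field i j == 0 || pvGetB s.2.2 i j) = true := by
        simp [hc1, hc2]
      have hres := pvCellEq field rows cols s.2.2 hs i j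
      have hsh : (pvExtractA field rows cols ((field.map List.length).sum + 1) (s.2.2, []) i j).1.map
            List.length = field.map List.length := by
        rw [pvExtractA_shape]; exact hs
      obtain ⟨t, ht⟩ := pvExtractA_head field rows cols ((field.map List.length).sum) s.2.2 i j hg hv
      have hclass : pvCheckSquare field
          (pvExtractA field rows cols ((field.map List.length).sum + 1) (s.2.2, []) i j).2 =
          (j == 0 || i == rows - 1 || pvGetI field (i + 1) (j - 1) == 0) := by
        rw [ht]
        simp only [pvCheckSquare, ← hr]
        split_ifs with h
        · rw [h]
        · exact ((Bool.not_eq_true _).mp h).symm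
      simp only [if_pos hc, hclass, ← hres]
      by_cases hq : (j == 0 || i == rows - 1 || pvGetI field (i + 1) (j - 1) == 0) = true
      · simp only [if_pos hq]
        exact ih hmem' _ (by simpa using hsh)
      · simp only [if_neg hq]
        exact ih hmem' _ (by simpa using hsh)
    · simp only [if_neg hc]; exact ih hmem' s hs

lemma pvOuterCong (field : List (List Int)) (rows cols : Int) (hr : rows = (field.length : Int)) :
    ∀ (l : List Int), (∀ i ∈ l, 0 ≤ i ∧ i < rows) → ∀ (s : Int × Int × List (List Bool)),
      s.2.2.map List.length = field.map List.length →
      l.foldl (fun s i => (PySem.List.pyRange 0 cols 1).foldl (fun s j =>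
          if pvGetI field i j == 1 && !(pvGetB s.2.2 i j) then
            let res := pvExtractA field rows cols ((field.map List.length).sum + 1) (s.2.2, []) i j
            if pvCheckSquare field res.2 then (s.1 + 1, s.2.1, res.1)
            else (s.1, s.2.1 + 1, res.1)
          else s) s) s =
        l.foldl (fun s i => (PySem.List.pyRange 0 cols 1).foldl (fun s j =>
          if pvGetI field i j == 1 && !(pvGetB s.2.2 i j) then
            let vis' := pvFloodB field rows cols (9 * (field.map List.length).sum + 1) s.2.2 [(i, j)]
            if j == 0 || i == rows - 1 || pvGetI field (i + 1) (j - 1) == 0 then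
              (s.1 + 1, s.2.1, vis')
            else (s.1, s.2.1 + 1, vis')
          else s) s) s := by
  intro l
  induction l with
  | nil => intro _ s _; rfl
  | cons i is ih =>
    intro hmem s hs
    have hi : 0 ≤ i ∧ i < rows := hmem i (List.mem_cons_self ..)
    rw [List.foldl_cons, List.foldl_cons]
    obtain ⟨heq, hsh⟩ := pvInnerCong field rows cols hr i hi (PySem.List.pyRange 0 cols 1)
      (fun j hj => by
        rw [PySem.List.mem_pyRange_one] at hj; exact hj) s hs
    rw [← heq]
    exact ih (fun i' h' => hmem i' (List.mem_cons_of_mem _ h')) _ hsh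

-- ===== VERDICT (by name: the statement is the Claim_ definition above) =====
theorem FindAFigures_spec : Claim_equal_FindAFigures := by
  intro fm _ _
  unfold Spec_FindAFigures FindAFigures FindAFigures_alt
  have hcong := pvOuterCong fm (fm.length : Int) ((fm.headI).length : Int) rfl
      (PySem.List.pyRange 0 (fm.length : Int) 1)
      (fun i hi => by rw [PySem.List.mem_pyRange_one] at hi; exact hi)
      ((0 : Int), (0 : Int), fm.map (fun line => line.map (fun _ => false)))
      (by simp)
  simp only []
  rw [hcong]
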